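-- pv_equiv track=rewrite | github.com/ENFStudios/mister-companion-macos | core/update_all_config.py | remove_section_from_lines
-- ===== SOURCE A (Python) =====
-- def remove_section_from_lines(lines, section):
--     new_lines = []
--     skip = False
--
--     for line in lines:
--         stripped = line.strip()
--
--         if stripped.startswith("[") and stripped.endswith("]"):
--             skip = stripped.strip("[]") == section
--
--         if not skip:
--             new_lines.append(line)
--
--     return new_lines
-- ===== SOURCE B (Python) =====
-- def remove_section_from_lines(lines, section):
--     # Split into contiguous groups, starting a new group at each header line;
--     # keep every group whose header does not name `section`.
--     groups = []
--     current = []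
--     for line in lines:
--         stripped = line.strip()
--         if stripped.startswith("[") and stripped.endswith("]"):
--             groups.append(current)
--             current = [line]
--         else:
--             current.append(line)
--     groups.append(current)
--
--     out = []
--     for g in groups:
--         if g:
--             head = g[0].strip()
--             if head.startswith("[") and head.endswith("]") and head.strip("[]") == section:
--                 continue
--         out.extend(g)
--     return out
-- ===== Notes on version B (the rewrite author's own statement) =====
-- stated objective: alternative
-- what changed: B splits the lines into contiguous header-delimited groups first and then concatenates the groups whose header does not name the section, instead of A's single pass with a running skip flag.
import Mathlib
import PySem

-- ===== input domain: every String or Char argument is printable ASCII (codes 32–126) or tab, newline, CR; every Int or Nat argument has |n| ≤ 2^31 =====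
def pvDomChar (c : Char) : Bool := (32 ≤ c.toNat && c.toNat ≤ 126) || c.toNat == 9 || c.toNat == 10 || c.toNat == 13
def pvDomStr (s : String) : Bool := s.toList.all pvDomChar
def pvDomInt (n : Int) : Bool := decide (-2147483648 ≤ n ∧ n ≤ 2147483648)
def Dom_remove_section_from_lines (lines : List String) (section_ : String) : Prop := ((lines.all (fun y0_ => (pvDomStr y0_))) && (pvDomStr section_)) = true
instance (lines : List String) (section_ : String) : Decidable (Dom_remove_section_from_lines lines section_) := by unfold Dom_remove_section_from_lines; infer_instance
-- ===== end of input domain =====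

-- B splits the lines into contiguous header-delimited groups and concatenates the
-- groups whose header does not name the section, instead of A's running skip flag (alternative decomposition, same cost).

-- ===== PORT A =====
-- A: one pass with accumulator new_lines and a running boolean skip flag.
def remove_section_from_lines (lines : List String) (section_ : String) : List String :=
  (lines.foldl
    (fun (st : List String × Bool) line =>
      let stripped := PySem.Str.strip line
      let skip :=
        if PySem.Str.startswith stripped "[" && PySem.Str.endswith stripped "]" then
          PySem.Str.stripChars stripped "[]" == section_
        else st.2
      if !skip then (st.1 ++ [line], skip) else (st.1, skip))
    ([], false)).1

-- ===== PORT B =====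
-- Source B helper shape: header test on the stripped line
def pvIsHeader (line : String) : Bool :=
  let stripped := PySem.Str.strip line
  PySem.Str.startswith stripped "[" && PySem.Str.endswith stripped "]"

-- Source B's per-group test: nonempty group whose head is a header naming section_
def pvDropGroup (section_ : String) (g : List String) : Bool :=
  match g with
  | [] => false
  | h :: _ =>
    let head := PySem.Str.strip h
    PySem.Str.startswith head "[" && PySem.Str.endswith head "]"
      && (PySem.Str.stripChars head "[]" == section_)

def remove_section_from_lines_alt (lines : List String) (section_ : String) : List String :=
  let st := lines.foldl
    (fun (st : List (List String) × List String) line =>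
      if pvIsHeader line then (st.1 ++ [st.2], [line]) else (st.1, st.2 ++ [line]))
    ([], [])
  let groups := st.1 ++ [st.2]
  groups.foldl (fun out g => if pvDropGroup section_ g then out else out ++ g) []

-- ===== PRECONDITION & SPEC =====
def Spec_remove_section_from_lines (lines : List String) (section_ : String) (out : List String) : Prop := out = remove_section_from_lines_alt lines section_
instance (lines : List String) (section_ : String) (out : List String) : Decidable (Spec_remove_section_from_lines lines section_ out) := by unfold Spec_remove_section_from_lines; infer_instance

-- ===== CLAIM (what is proved, stated in full; the proofs are below) =====
def Claim_equal_remove_section_from_lines : Prop := ∀ (lines : List String) (section_ : String), Dom_remove_section_from_lines lines section_ → Spec_remove_section_from_lines lines section_ (remove_section_from_lines lines section_)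

-- ===== LEMMAS AND PROOFS =====

-- whether a header line names section_
def pvMatch (section_ line : String) : Bool :=
  PySem.Str.stripChars (PySem.Str.strip line) "[]" == section_

-- reference recursion: result of A's loop from a given skip state
def pvRef (section_ : String) : Bool → List String → List String
  | _, [] => []
  | skip, l :: ls =>
    if pvIsHeader l then
      if pvMatch section_ l then pvRef section_ true ls else l :: pvRef section_ false ls
    else if skip then pvRef section_ skip ls else l :: pvRef section_ skip ls

lemma pvA_fold (section_ : String) (ls : List String) :
    ∀ (acc : List String) (skip : Bool),
      (ls.foldl
        (fun (st : List String × Bool) line =>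
          let stripped := PySem.Str.strip line
          let skip :=
            if PySem.Str.startswith stripped "[" && PySem.Str.endswith stripped "]" then
              PySem.Str.stripChars stripped "[]" == section_
            else st.2
          if !skip then (st.1 ++ [line], skip) else (st.1, skip))
        (acc, skip)).1 = acc ++ pvRef section_ skip ls := by
  induction ls with
  | nil => intro acc skip; simp [pvRef]
  | cons l ls ih =>
    intro acc skip
    by_cases h : pvIsHeader l
    · have h' : (PySem.Str.startswith (PySem.Str.strip l) "[" && PySem.Str.endswith (PySem.Str.strip l) "]") = true := h
      by_cases hm : pvMatch section_ l
      · have hm' : (PySem.Str.stripChars (PySem.Str.strip l) "[]" == section_) = true := hm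
        simp only [List.foldl_cons, pvRef, h, h', hm, hm', if_true, Bool.not_true,
          Bool.false_eq_true, ite_false, ih]
      · have hmf : pvMatch section_ l = false := by simpa using hm
        have hm' : (PySem.Str.stripChars (PySem.Str.strip l) "[]" == section_) = false := hmf
        simp only [List.foldl_cons, pvRef, h, h', hmf, hm', if_true, Bool.not_false,
          Bool.false_eq_true, ite_false, ih]
        simp
    · have h' : (PySem.Str.startswith (PySem.Str.strip l) "[" && PySem.Str.endswith (PySem.Str.strip l) "]") = false := by
        simpa [pvIsHeader] using h
      have hb : pvIsHeader l = false := by simpa using h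
      cases skip with
      | true =>
        simp only [List.foldl_cons, pvRef, hb, h', Bool.false_eq_true, ite_false, Bool.not_true,
          ite_true, ih]
      | false =>
        simp only [List.foldl_cons, pvRef, hb, h', Bool.false_eq_true, ite_false, Bool.not_false,
          ite_true, ih]
        simp

-- the groups Source B's first loop produces, as a recursion
def pvMkGroups : List String → List String → List (List String)
  | cur, [] => [cur]
  | cur, l :: ls =>
    if pvIsHeader l then cur :: pvMkGroups [l] ls else pvMkGroups (cur ++ [l]) ls

lemma pvB_fold1 (ls : List String) :
    ∀ (gs : List (List String)) (cur : List String),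
      (ls.foldl
        (fun (st : List (List String) × List String) line =>
          if pvIsHeader line then (st.1 ++ [st.2], [line]) else (st.1, st.2 ++ [line]))
        (gs, cur)).1
      ++ [(ls.foldl
        (fun (st : List (List String) × List String) line =>
          if pvIsHeader line then (st.1 ++ [st.2], [line]) else (st.1, st.2 ++ [line]))
        (gs, cur)).2]
      = gs ++ pvMkGroups cur ls := by
  induction ls with
  | nil => intro gs cur; simp [pvMkGroups]
  | cons l ls ih =>
    intro gs cur
    by_cases h : pvIsHeader l
    · simp [List.foldl_cons, h, pvMkGroups, ih]
    · simp [List.foldl_cons, h, pvMkGroups, ih]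

-- concatenation of the kept groups
def pvKeep (section_ : String) (gs : List (List String)) : List String :=
  (gs.filter (fun g => !pvDropGroup section_ g)).flatten

lemma pvB_fold2 (section_ : String) (gs : List (List String)) :
    ∀ (acc : List String),
      gs.foldl (fun out g => if pvDropGroup section_ g then out else out ++ g) acc
        = acc ++ pvKeep section_ gs := by
  induction gs with
  | nil => intro acc; simp [pvKeep]
  | cons g gs ih =>
    intro acc
    by_cases h : pvDropGroup section_ g <;>
      simp [List.foldl_cons, h, pvKeep, ih]

lemma pvDrop_snoc (section_ : String) (cur : List String) (l : String)
    (h : pvIsHeader l = false) :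
    pvDropGroup section_ (cur ++ [l]) = pvDropGroup section_ cur := by
  cases cur with
  | nil =>
    simp only [pvIsHeader] at h
    show (PySem.Str.startswith (PySem.Str.strip l) "[" && PySem.Str.endswith (PySem.Str.strip l) "]"
      && (PySem.Str.stripChars (PySem.Str.strip l) "[]" == section_)) = false
    rw [h, Bool.false_and]
  | cons a t => simp [pvDropGroup]

lemma pvDrop_single (section_ : String) (l : String) (h : pvIsHeader l = true) :
    pvDropGroup section_ [l] = pvMatch section_ l := by
  simp only [pvIsHeader] at h
  show (PySem.Str.startswith (PySem.Str.strip l) "[" && PySem.Str.endswith (PySem.Str.strip l) "]"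
    && (PySem.Str.stripChars (PySem.Str.strip l) "[]" == section_)) = pvMatch section_ l
  rw [h, Bool.true_and]
  rfl

lemma pvKeep_cons (section_ : String) (g : List String) (gs : List (List String)) :
    pvKeep section_ (g :: gs)
      = (if pvDropGroup section_ g then [] else g) ++ pvKeep section_ gs := by
  by_cases h : pvDropGroup section_ g <;> simp [pvKeep, h]

lemma pvMain (section_ : String) (ls : List String) :
    ∀ (cur : List String),
      pvKeep section_ (pvMkGroups cur ls)
        = (if pvDropGroup section_ cur then [] else cur)
          ++ pvRef section_ (pvDropGroup section_ cur) ls := by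
  induction ls with
  | nil =>
    intro cur
    by_cases h : pvDropGroup section_ cur <;> simp [pvMkGroups, pvKeep, pvRef, h]
  | cons l ls ih =>
    intro cur
    by_cases h : pvIsHeader l
    · rw [pvMkGroups, if_pos h, pvKeep_cons, ih, pvDrop_single section_ l h]
      conv_rhs => rw [pvRef]
      rw [if_pos h]
      by_cases hm : pvMatch section_ l
      · rw [if_pos hm, if_pos hm]; simp [hm]
      · have hmf : pvMatch section_ l = false := by simpa using hm
        rw [if_neg hm, if_neg hm]; simp [hmf]
    · have hb : pvIsHeader l = false := by simpa using h
      rw [pvMkGroups, if_neg (by simp [hb]), ih, pvDrop_snoc section_ cur l hb]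
      conv_rhs => rw [pvRef]
      by_cases hc : pvDropGroup section_ cur <;> simp [hb, hc]

-- ===== VERDICT (by name: the statement is the Claim_ definition above) =====
theorem remove_section_from_lines_spec : Claim_equal_remove_section_from_lines := by
  intro lines section_ _
  unfold Spec_remove_section_from_lines remove_section_from_lines remove_section_from_lines_alt
  rw [pvA_fold section_ lines [] false, pvB_fold2]
  have h1 := pvB_fold1 lines [] []
  simp only [List.nil_append] at h1
  rw [show ((lines.foldl
        (fun (st : List (List String) × List String) line =>
          if pvIsHeader line then (st.1 ++ [st.2], [line]) else (st.1, st.2 ++ [line]))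
        ([], [])).1
      ++ [(lines.foldl
        (fun (st : List (List String) × List String) line =>
          if pvIsHeader line then (st.1 ++ [st.2], [line]) else (st.1, st.2 ++ [line]))
        ([], [])).2]) = pvMkGroups [] lines from h1]
  rw [pvMain]
  simp [pvDropGroup]
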